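-- pv_equiv track=rewrite | github.com/SadriddinDev/BinarySearch | Problems/Easy/392.py | solve
-- ===== SOURCE A (Python) =====
-- def solve(s):
--     bracket_list = []
--     b_s = ""
--     o_count = 0
--     for c in s:
--         b_s += c
--         if c == "(":
--             o_count += 1
--         else:
--             o_count -= 1
--             if o_count == 0:
--                 bracket_list.append(b_s)
--                 b_s = ""
--     return bracket_list
-- ===== SOURCE B (Python) =====
-- def solve(s):
--     # Pass 1: running-depth table ('(' -> +1, anything else -> -1).
--     depths = []
--     d = 0
--     for c in s:
--         d += 1 if c == "(" else -1
--         depths.append(d)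
--     # Pass 2: cut a slice whenever a closing char brings the depth to zero.
--     res = []
--     start = 0
--     for i, c in enumerate(s):
--         if c != "(" and depths[i] == 0:
--             res.append(s[start:i + 1])
--             start = i + 1
--     return res
-- ===== Notes on version B (the rewrite author's own statement) =====
-- stated objective: alternative
-- what changed: B replaces A's single pass that grows a character buffer and cuts it when the counter hits zero by two passes: first a running-depth table over the string, then a slicing pass that emits s[start:i+1] at each closing character whose tabulated depth is zero.
import Mathlib
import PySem

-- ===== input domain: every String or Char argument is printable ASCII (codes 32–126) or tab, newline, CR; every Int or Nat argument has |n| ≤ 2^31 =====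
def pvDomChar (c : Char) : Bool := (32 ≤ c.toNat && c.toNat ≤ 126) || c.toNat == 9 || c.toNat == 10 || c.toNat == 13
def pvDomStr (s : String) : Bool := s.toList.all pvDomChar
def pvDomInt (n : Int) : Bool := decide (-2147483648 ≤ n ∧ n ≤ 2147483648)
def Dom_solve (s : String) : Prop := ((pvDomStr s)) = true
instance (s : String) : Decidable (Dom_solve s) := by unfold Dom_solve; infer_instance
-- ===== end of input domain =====

-- B replaces A's char-by-char buffer accumulation by two passes (a running-depth
-- table, then slicing the string at zero-depth closing positions); objective: alternative decomposition.

-- ===== PORT A =====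
def solve (s : String) : List String :=
  (s.toList.foldl
    (fun (st : List String × List Char × Int) c =>
      let bs := st.2.1 ++ [c]
      if c = '(' then (st.1, bs, st.2.2 + 1)
      else
        let oc := st.2.2 - 1
        if oc = 0 then (st.1 ++ [String.mk bs], ([] : List Char), oc)
        else (st.1, bs, oc)) ([], [], 0)).1

-- ===== PORT B =====
def solve_alt (s : String) : List String :=
  let cs := s.toList
  -- pass 1: running-depth table
  let depths := (cs.foldl
    (fun (st : List Int × Int) c =>
      let d := st.2 + (if c = '(' then (1 : Int) else -1)
      (st.1 ++ [d], d)) ([], 0)).1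
  -- pass 2: cut slices; depths[i] is always in range here, so pyGetD with default 0 is exact
  ((PySem.List.enumerate cs 0).foldl
    (fun (st : List String × Int) (ic : Int × Char) =>
      if ic.2 ≠ '(' ∧ PySem.List.pyGetD depths ic.1 0 = 0 then
        (st.1 ++ [String.mk (PySem.List.slice cs (some st.2) (some (ic.1 + 1)))], ic.1 + 1)
      else st) ([], 0)).1

-- ===== PRECONDITION & SPEC =====
def Spec_solve (s : String) (out : List String) : Prop := out = solve_alt s
instance (s : String) (out : List String) : Decidable (Spec_solve s out) := by unfold Spec_solve; infer_instance

-- ===== CLAIM (what is proved, stated in full; the proofs are below) =====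
def Claim_equal_solve : Prop := ∀ (s : String), Dom_solve s → Spec_solve s (solve s)

-- ===== LEMMAS AND PROOFS =====

-- ±1 contribution of one character
def pvDelta (c : Char) : Int := if c = '(' then 1 else -1

-- depth after a prefix
def pvBal : List Char → Int
  | [] => 0
  | c :: t => pvDelta c + pvBal t

-- the running-depth table, as a structural recursion
def pvScan : List Char → Int → List Int
  | [], _ => []
  | c :: t, d => (d + pvDelta c) :: pvScan t (d + pvDelta c)

-- reference segmentation: remaining input, current buffer, current depth
def pvSegs : List Char → List Char → Int → List String
  | [], _, _ => []
  | c :: t, bs, d =>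
    if c = '(' then pvSegs t (bs ++ [c]) (d + 1)
    else if d - 1 = 0 then String.mk (bs ++ [c]) :: pvSegs t [] (d - 1)
    else pvSegs t (bs ++ [c]) (d - 1)

theorem pvBal_append (l r : List Char) : pvBal (l ++ r) = pvBal l + pvBal r := by
  induction l with
  | nil => simp [pvBal]
  | cons c t ih => simp [pvBal, ih]; ring

theorem pvBal_take_succ (cs : List Char) (k : Nat) (c : Char) (h : cs[k]? = some c) :
    pvBal (cs.take (k + 1)) = pvBal (cs.take k) + pvDelta c := by
  rw [List.take_succ, h, pvBal_append]
  simp [pvBal]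

theorem pvScan_fold (cs : List Char) : ∀ (acc : List Int) (d : Int),
    (cs.foldl (fun (st : List Int × Int) c =>
        let d := st.2 + (if c = '(' then (1 : Int) else -1)
        (st.1 ++ [d], d)) (acc, d)).1 = acc ++ pvScan cs d := by
  induction cs with
  | nil => intro acc d; simp [pvScan]
  | cons c t ih =>
    intro acc d
    simp only [List.foldl_cons]
    rw [ih]
    simp [pvScan, pvDelta, List.append_assoc]

theorem pvScan_getD (cs : List Char) : ∀ (k : Nat) (d : Int), k < cs.length →
    (pvScan cs d).getD k 0 = d + pvBal (cs.take (k + 1)) := by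
  induction cs with
  | nil => intro k d h; simp at h
  | cons c t ih =>
    intro k d h
    cases k with
    | zero => simp [pvScan, pvBal]
    | succ k =>
      simp only [pvScan, List.getD_cons_succ]
      rw [ih k _ (by simpa using h)]
      simp [pvBal]
      ring

theorem pvSegs_fold (t : List Char) : ∀ (bl : List String) (bs : List Char) (d : Int),
    (t.foldl (fun (st : List String × List Char × Int) c =>
      let bs := st.2.1 ++ [c]
      if c = '(' then (st.1, bs, st.2.2 + 1)
      else
        let oc := st.2.2 - 1
        if oc = 0 then (st.1 ++ [String.mk bs], ([] : List Char), oc)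
        else (st.1, bs, oc)) (bl, bs, d)).1 = bl ++ pvSegs t bs d := by
  induction t with
  | nil => intro bl bs d; simp [pvSegs]
  | cons c t ih =>
    intro bl bs d
    simp only [List.foldl_cons, pvSegs]
    by_cases hc : c = '('
    · simp only [hc]
      exact ih ..
    · simp only [if_neg hc]
      by_cases hz : d - 1 = 0
      · simp only [hz]
        rw [ih]
        simp
      · simp only [if_neg hz]
        exact ih ..

theorem pvB_loop (cs : List Char) : ∀ (t : List Char) (k start : Nat) (res : List String),
    cs.drop k = t → start ≤ k →
    ((PySem.List.enumerate t (k : Int)).foldl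
      (fun (st : List String × Int) (ic : Int × Char) =>
        if ic.2 ≠ '(' ∧ PySem.List.pyGetD (pvScan cs 0) ic.1 0 = 0 then
          (st.1 ++ [String.mk (PySem.List.slice cs (some st.2) (some (ic.1 + 1)))], ic.1 + 1)
        else st) (res, (start : Int))).1
      = res ++ pvSegs t ((cs.drop start).take (k - start)) (pvBal (cs.take k)) := by
  intro t
  induction t with
  | nil => intro k start res _ _; simp [pvSegs, PySem.List.enumerate_nil]
  | cons c t ih =>
    intro k start res hdrop hle
    have hk : k < cs.length := by
      by_contra h
      have hnil : cs.drop k = [] := List.drop_eq_nil_of_le (by omega)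
      rw [hdrop] at hnil; exact (List.cons_ne_nil _ _) hnil
    have hget : cs[k]? = some c := by
      have h0 : (cs.drop k)[0]? = cs[k + 0]? := List.getElem?_drop ..
      rw [hdrop] at h0
      simpa using h0.symm
    have hdrop' : cs.drop (k + 1) = t := by
      have h := congrArg (List.drop 1) hdrop
      simpa [List.drop_drop, Nat.add_comm] using h
    have hdepth : PySem.List.pyGetD (pvScan cs 0) ((k : Int)) 0
        = pvBal (cs.take k) + pvDelta c := by
      rw [PySem.List.pyGetD_natCast, pvScan_getD cs k 0 hk,
        pvBal_take_succ cs k c hget]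
      ring
    have hbal' : pvBal (cs.take (k + 1)) = pvBal (cs.take k) + pvDelta c :=
      pvBal_take_succ cs k c hget
    have hbuf : ∀ s : Nat, s ≤ k →
        (cs.drop s).take (k + 1 - s) = (cs.drop s).take (k - s) ++ [c] := by
      intro s hs
      have : k + 1 - s = (k - s) + 1 := by omega
      rw [this, List.take_succ]
      have hg : (cs.drop s)[k - s]? = some c := by
        rw [List.getElem?_drop]
        have : s + (k - s) = k := by omega
        rw [this]; exact hget
      simp [hg]
    have hslice : PySem.List.slice cs (some ((start : Nat) : Int)) (some ((k : Int) + 1))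
        = (cs.drop start).take (k - start) ++ [c] := by
      have hcast : ((k : Int) + 1) = (((k + 1 : Nat) : Int)) := by push_cast; ring
      rw [hcast, PySem.List.slice_natCast]
      exact hbuf start hle
    rw [PySem.List.enumerate_cons]
    simp only [List.foldl_cons]
    by_cases hc : c = '('
    · have hcond : ¬ (c ≠ '(' ∧ PySem.List.pyGetD (pvScan cs 0) ((k : Int)) 0 = 0) := by
        simp [hc]
      simp only [if_neg hcond]
      have hcast1 : ((k : Int) + 1) = (((k + 1 : Nat) : Int)) := by push_cast; ring
      rw [hcast1, ih (k + 1) start res hdrop' (by omega)]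
      rw [hbuf start hle, hbal']
      simp [pvSegs, hc, pvDelta]
    · by_cases hz : pvBal (cs.take k) - 1 = 0
      · have hcond : (c ≠ '(' ∧ PySem.List.pyGetD (pvScan cs 0) ((k : Int)) 0 = 0) := by
          refine ⟨hc, ?_⟩
          rw [hdepth]
          simp [pvDelta, hc]
          omega
        simp only [if_pos hcond, hslice]
        have hcast1 : ((k : Int) + 1) = (((k + 1 : Nat) : Int)) := by push_cast; ring
        rw [hcast1, ih (k + 1) (k + 1) (res ++ [String.mk ((cs.drop start).take (k - start) ++ [c])]) hdrop' (by omega)]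
        rw [hbal']
        simp only [pvSegs, if_neg hc, hz, Nat.sub_self, List.take_zero, pvDelta]
        have h0 : pvBal (cs.take k) + -1 = (0 : Int) := by omega
        simp [h0]
      · have hcond : ¬ (c ≠ '(' ∧ PySem.List.pyGetD (pvScan cs 0) ((k : Int)) 0 = 0) := by
          rintro ⟨_, h0⟩
          rw [hdepth] at h0
          simp [pvDelta, hc] at h0
          omega
        simp only [if_neg hcond]
        have hcast1 : ((k : Int) + 1) = (((k + 1 : Nat) : Int)) := by push_cast; ring
        rw [hcast1, ih (k + 1) start res hdrop' (by omega)]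
        rw [hbuf start hle, hbal']
        have hs : pvBal (cs.take k) + pvDelta c = pvBal (cs.take k) - 1 := by
          simp [pvDelta, if_neg hc]; ring
        rw [hs]
        simp [pvSegs, hc, hz]

-- ===== VERDICT (by name: the statement is the Claim_ definition above) =====
theorem solve_spec : Claim_equal_solve := by
  intro s _
  unfold Spec_solve solve solve_alt
  dsimp only
  rw [pvSegs_fold, pvScan_fold s.toList [] 0, List.nil_append, List.nil_append]
  have h := pvB_loop s.toList s.toList 0 0 [] (by simp) (le_refl 0)
  simp only [Nat.cast_zero, List.drop_zero, Nat.sub_self, List.take_zero, pvBal,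
    List.nil_append] at h
  exact h.symm
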